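-- pv_equiv track=rewrite | github.com/nghuy052711/breast-cancer-detection-ai | detect_turmor_main_2.py | smart_sliding_windows
-- ===== SOURCE A (Python) =====
-- MAX_WINDOWS = 100
--
-- def smart_sliding_windows(img_shape, window_size, stride, max_windows=MAX_WINDOWS):
--     """Generate sliding window coordinates with adaptive stride for large images."""
--     h, w = img_shape[:2]
--     adaptive_stride = window_size if max(h, w) > 2000 else stride
--     windows = []
--     for y in range(0, h - window_size + 1, adaptive_stride):
--         for x in range(0, w - window_size + 1, adaptive_stride):
--             windows.append((x, y, x + window_size, y + window_size))
--             if len(windows) >= max_windows: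
--                 return windows
--     return windows
-- ===== SOURCE B (Python) =====
-- MAX_WINDOWS = 100
--
-- def smart_sliding_windows(img_shape, window_size, stride, max_windows=MAX_WINDOWS):
--     """Flat indexed pass: compute each window from its grid index by divmod."""
--     h, w = img_shape[:2]
--     s = window_size if max(h, w) > 2000 else stride
--     xs = range(0, w - window_size + 1, s)
--     ys = range(0, h - window_size + 1, s)
--     nx = len(xs)
--     count = min(nx * len(ys), max_windows)
--     out = []
--     for i in range(count):
--         r, c = divmod(i, nx)
--         x, y = c * s, r * s
--         out.append((x, y, x + window_size, y + window_size))
--     return out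
-- ===== Notes on version B (the rewrite author's own statement) =====
-- stated objective: alternative
-- what changed: Replaces the two nested loops with a running-length/early-return check by a single flat indexed pass: count = min(nx*ny, max_windows) windows are produced by divmod of the grid index, computing coordinates arithmetically.
-- intended difference: When max_windows <= 0 and the window grid is nonempty, A appends the first window (0,0,window_size,window_size) before checking the cap and returns it, while B returns [] — the intended result of a non-positive cap. — e.g. on smart_sliding_windows([3, 3], 2, 1, 0): A returns [(0, 0, 2, 2)], B returns []
import Mathlib
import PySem

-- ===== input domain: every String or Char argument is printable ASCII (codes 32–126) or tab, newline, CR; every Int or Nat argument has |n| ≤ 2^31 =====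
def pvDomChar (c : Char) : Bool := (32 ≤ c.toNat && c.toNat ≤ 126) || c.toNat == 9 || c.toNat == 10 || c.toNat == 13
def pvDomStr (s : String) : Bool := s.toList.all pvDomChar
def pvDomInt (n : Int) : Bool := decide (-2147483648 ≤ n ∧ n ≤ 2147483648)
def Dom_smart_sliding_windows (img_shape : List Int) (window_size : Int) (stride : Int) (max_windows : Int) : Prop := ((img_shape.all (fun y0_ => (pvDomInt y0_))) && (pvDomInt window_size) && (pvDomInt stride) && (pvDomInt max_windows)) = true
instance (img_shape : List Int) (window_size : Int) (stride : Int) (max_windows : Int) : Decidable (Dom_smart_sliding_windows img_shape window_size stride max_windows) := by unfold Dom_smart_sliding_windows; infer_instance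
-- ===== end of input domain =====

-- B replaces A's nested loops + early return by one flat indexed pass (divmod on the
-- grid index); equal to A outside D_ (the non-positive-cap corner stated below).

-- ===== PORT A =====
-- inner 'for x' loop: appends a window, returns early (flag true) once the cap is reached
def swInnerA (ws mw y : Int) : List Int → List (Int × Int × Int × Int) → (List (Int × Int × Int × Int) × Bool)
  | [], acc => (acc, false)
  | x :: rest, acc =>
    let acc' := acc ++ [(x, y, x + ws, y + ws)]
    if mw ≤ (acc'.length : Int) then (acc', true) else swInnerA ws mw y rest acc'

-- outer 'for y' loop: stops when the inner loop signalled the early return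
def swOuterA (ws mw : Int) (xs : List Int) : List Int → List (Int × Int × Int × Int) → List (Int × Int × Int × Int)
  | [], acc => acc
  | y :: rest, acc =>
    let p := swInnerA ws mw y xs acc
    if p.2 then p.1 else swOuterA ws mw xs rest p.1

def smart_sliding_windows (img_shape : List Int) (window_size : Int) (stride : Int) (max_windows : Int) : List (Int × Int × Int × Int) :=
  let h := PySem.List.pyGetD img_shape 0 0
  let w := PySem.List.pyGetD img_shape 1 0
  let adaptive_stride := if max h w > 2000 then window_size else stride
  swOuterA window_size max_windows
    (PySem.List.pyRange 0 (w - window_size + 1) adaptive_stride)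
    (PySem.List.pyRange 0 (h - window_size + 1) adaptive_stride) []

-- ===== PORT B =====
def smart_sliding_windows_alt (img_shape : List Int) (window_size : Int) (stride : Int) (max_windows : Int) : List (Int × Int × Int × Int) :=
  let h := PySem.List.pyGetD img_shape 0 0
  let w := PySem.List.pyGetD img_shape 1 0
  let s := if max h w > 2000 then window_size else stride
  let nx : Int := ((PySem.List.pyRange 0 (w - window_size + 1) s).length : Int)
  let ny : Int := ((PySem.List.pyRange 0 (h - window_size + 1) s).length : Int)
  let count := min (nx * ny) max_windows
  (PySem.List.pyRange 0 count 1).map (fun i =>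
    let r := PySem.Int.floordiv i nx
    let c := PySem.Int.mod i nx
    (c * s, r * s, c * s + window_size, r * s + window_size))

-- ===== PRECONDITION & SPEC =====
-- Pre_ excludes exactly the inputs where A raises: fewer than two dims (ValueError on
-- unpacking) and adaptive stride 0 (ValueError from range).
def Pre_smart_sliding_windows (img_shape : List Int) (window_size : Int) (stride : Int) (max_windows : Int) : Prop :=
  2 ≤ img_shape.length ∧
  (if max (PySem.List.pyGetD img_shape 0 0) (PySem.List.pyGetD img_shape 1 0) > 2000 then window_size else stride) ≠ 0
instance (img_shape : List Int) (window_size : Int) (stride : Int) (max_windows : Int) : Decidable (Pre_smart_sliding_windows img_shape window_size stride max_windows) := by unfold Pre_smart_sliding_windows; infer_instance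

def pvWitness_smart_sliding_windows : List Int × Int × Int × Int := ([5, 6], 2, 2, 100)

-- When max_windows ≤ 0 and the window grid is nonempty, A appends the first window
-- (0,0,window_size,window_size) before checking the cap and returns it, while B returns
-- [] — the intended result of a non-positive cap.
def D_smart_sliding_windows (img_shape : List Int) (window_size : Int) (stride : Int) (max_windows : Int) : Prop :=
  let h := PySem.List.pyGetD img_shape 0 0
  let w := PySem.List.pyGetD img_shape 1 0
  let s := if max h w > 2000 then window_size else stride
  let tx := w - window_size + 1
  let ty := h - window_size + 1
  max_windows ≤ 0 ∧ ((0 < s ∧ 0 < tx ∧ 0 < ty) ∨ (s < 0 ∧ tx < 0 ∧ ty < 0))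
instance (img_shape : List Int) (window_size : Int) (stride : Int) (max_windows : Int) : Decidable (D_smart_sliding_windows img_shape window_size stride max_windows) := by unfold D_smart_sliding_windows; infer_instance

def Spec_smart_sliding_windows (img_shape : List Int) (window_size : Int) (stride : Int) (max_windows : Int) (out : List (Int × Int × Int × Int)) : Prop := ¬ D_smart_sliding_windows img_shape window_size stride max_windows → out = smart_sliding_windows_alt img_shape window_size stride max_windows
instance (img_shape : List Int) (window_size : Int) (stride : Int) (max_windows : Int) (out : List (Int × Int × Int × Int)) : Decidable (Spec_smart_sliding_windows img_shape window_size stride max_windows out) := by unfold Spec_smart_sliding_windows; infer_instance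

def pvDiffWitness_smart_sliding_windows : List Int × Int × Int × Int := ([3, 3], 2, 1, 0)
def pvDiffWitnessOut_smart_sliding_windows : (List (Int × Int × Int × Int)) × (List (Int × Int × Int × Int)) := ([(0, 0, 2, 2)], [])

-- ===== CLAIM (what is proved, stated in full; the proofs are below) =====
def Claim_unchanged_smart_sliding_windows : Prop := ∀ (img_shape : List Int) (window_size : Int) (stride : Int) (max_windows : Int), Dom_smart_sliding_windows img_shape window_size stride max_windows → Pre_smart_sliding_windows img_shape window_size stride max_windows → Spec_smart_sliding_windows img_shape window_size stride max_windows (smart_sliding_windows img_shape window_size stride max_windows)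
def Claim_changed_smart_sliding_windows : Prop := Dom_smart_sliding_windows (pvDiffWitness_smart_sliding_windows.1) (pvDiffWitness_smart_sliding_windows.2.1) (pvDiffWitness_smart_sliding_windows.2.2.1) (pvDiffWitness_smart_sliding_windows.2.2.2) ∧ Pre_smart_sliding_windows (pvDiffWitness_smart_sliding_windows.1) (pvDiffWitness_smart_sliding_windows.2.1) (pvDiffWitness_smart_sliding_windows.2.2.1) (pvDiffWitness_smart_sliding_windows.2.2.2) ∧ D_smart_sliding_windows (pvDiffWitness_smart_sliding_windows.1) (pvDiffWitness_smart_sliding_windows.2.1) (pvDiffWitness_smart_sliding_windows.2.2.1) (pvDiffWitness_smart_sliding_windows.2.2.2) ∧ smart_sliding_windows (pvDiffWitness_smart_sliding_windows.1) (pvDiffWitness_smart_sliding_windows.2.1) (pvDiffWitness_smart_sliding_windows.2.2.1) (pvDiffWitness_smart_sliding_windows.2.2.2) = pvDiffWitnessOut_smart_sliding_windows.1 ∧ smart_sliding_windows_alt (pvDiffWitness_smart_sliding_windows.1) (pvDiffWitness_smart_sliding_windows.2.1) (pvDiffWitness_smart_sliding_windows.2.2.1) (pvDiffWitness_smart_sliding_windows.2.2.2)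 = pvDiffWitnessOut_smart_sliding_windows.2 ∧ pvDiffWitnessOut_smart_sliding_windows.1 ≠ pvDiffWitnessOut_smart_sliding_windows.2
def Claim_exact_smart_sliding_windows : Prop := ∀ (img_shape : List Int) (window_size : Int) (stride : Int) (max_windows : Int), Dom_smart_sliding_windows img_shape window_size stride max_windows → Pre_smart_sliding_windows img_shape window_size stride max_windows → D_smart_sliding_windows img_shape window_size stride max_windows → smart_sliding_windows img_shape window_size stride max_windows ≠ smart_sliding_windows_alt img_shape window_size stride max_windows

-- ===== LEMMAS AND PROOFS =====

theorem sw_inner_eq (ws mw y : Int) : ∀ (xs : List Int) (acc : List (Int × Int × Int × Int)),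
    (acc.length : Int) < mw →
    swInnerA ws mw y xs acc =
      (acc ++ (xs.map (fun x => (x, y, x + ws, y + ws))).take (mw - acc.length).toNat,
       decide (mw ≤ (acc.length : Int) + xs.length)) := by
  intro xs
  induction xs with
  | nil =>
    intro acc h
    simp [swInnerA]
    omega
  | cons x rest ih =>
    intro acc h
    simp only [swInnerA, List.map_cons]
    by_cases hc : mw ≤ ((acc ++ [(x, y, x + ws, y + ws)]).length : Int)
    · simp only [hc, if_pos]
      have h1 : (mw - acc.length).toNat = 1 := by simp at hc; omega
      rw [h1]
      simp at hc ⊢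
      omega
    · simp only [hc, if_neg, not_false_iff]
      rw [ih _ (by simp at hc ⊢; omega)]
      have h2 : (mw - acc.length).toNat = ((mw - ((acc ++ [(x, y, x + ws, y + ws)]).length : Int)).toNat) + 1 := by
        simp at hc ⊢; omega
      rw [h2, List.take_succ_cons]
      simp
      all_goals omega

theorem sw_outer_eq (ws mw : Int) (xs : List Int) : ∀ (ys : List Int) (acc : List (Int × Int × Int × Int)),
    (acc.length : Int) < mw →
    swOuterA ws mw xs ys acc =
      acc ++ (ys.flatMap (fun y => xs.map (fun x => (x, y, x + ws, y + ws)))).take (mw - acc.length).toNat := by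
  intro ys
  induction ys with
  | nil => intro acc h; simp [swOuterA]
  | cons y rest ih =>
    intro acc h
    simp only [swOuterA, List.flatMap_cons]
    rw [sw_inner_eq ws mw y xs acc h]
    by_cases hf : mw ≤ (acc.length : Int) + xs.length
    · simp only [hf, decide_true, if_pos]
      have hle : (mw - acc.length).toNat ≤ (xs.map (fun x => (x, y, x + ws, y + ws))).length := by
        simp; omega
      rw [List.take_append]
      have : ((mw - acc.length).toNat - (xs.map (fun x => (x, y, x + ws, y + ws))).length) = 0 := by omega
      rw [this, List.take_zero, List.append_nil]
    · simp only [hf, decide_false, if_neg, Bool.false_eq_true, not_false_iff]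
      have hfull : (xs.map (fun x => (x, y, x + ws, y + ws))).take (mw - acc.length).toNat
          = xs.map (fun x => (x, y, x + ws, y + ws)) := by
        apply List.take_of_length_le
        simp; omega
      rw [hfull, ih _ (by simp; omega)]
      rw [List.take_append, List.append_assoc]
      congr 2
      · rw [List.take_of_length_le (by simp; omega)]
      · congr 1
        simp
        omega

-- grid closed form: the row-major product of two ranges, indexed by divmod
theorem grid_full {T : Type} (g : Nat → Nat → T) (ny nx : Nat) :
    (List.range ny).flatMap (fun r => (List.range nx).map (g r)) =
      (List.range (ny * nx)).map (fun i => g (i / nx) (i % nx)) := by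
  induction ny with
  | zero => simp
  | succ n ih =>
    rw [List.range_succ, List.flatMap_append, ih, Nat.succ_mul, List.range_add, List.map_append]
    congr 1
    · simp only [List.flatMap_cons, List.flatMap_nil, List.append_nil, List.map_map]
      refine List.map_congr_left (fun c hc => ?_)
      rw [List.mem_range] at hc
      have hnx : 0 < nx := by omega
      simp only [Function.comp_apply]
      rw [Nat.mul_comm n nx, Nat.mul_add_div hnx, Nat.mul_add_mod, Nat.div_eq_of_lt hc, Nat.mod_eq_of_lt hc, Nat.add_zero]

theorem grid_take {T : Type} (g : Nat → Nat → T) (ny nx cnt : Nat) (h : cnt ≤ ny * nx) :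
    (List.range cnt).map (fun i => g (i / nx) (i % nx)) =
      ((List.range ny).flatMap (fun r => (List.range nx).map (g r))).take cnt := by
  rw [grid_full, ← List.map_take, List.take_range, Nat.min_eq_left h]

-- pyRange 0 t s, any nonzero step, as a map over List.range of its own length
theorem pyRange_zero_eq (t s : Int) :
    PySem.List.pyRange 0 t s =
      (List.range (PySem.List.pyRange 0 t s).length).map (fun (k : Nat) => (s * (k : Int))) := by
  rw [PySem.List.pyRange]
  split_ifs <;>
    simp only [List.length_map, List.length_range, List.length_nil, List.range_zero, List.map_nil] <;>
    exact List.map_congr_left (fun k _ => by rw [zero_add])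

theorem flatMapCongrMem {A B : Type} {l : List A} {f g : A → List B}
    (h : ∀ a ∈ l, f a = g a) : l.flatMap f = l.flatMap g := by
  induction l with
  | nil => rfl
  | cons a l ih =>
    simp only [List.flatMap_cons]
    rw [h a (List.mem_cons_self), ih (fun b hb => h b (List.mem_cons_of_mem a hb))]

-- a range from 0 with nonzero step is nonempty iff (sign of step matches sign of stop)
theorem pyRange_zero_len_pos (t s : Int) (hs : s ≠ 0) :
    0 < (PySem.List.pyRange 0 t s).length ↔ ((0 < s ∧ 0 < t) ∨ (s < 0 ∧ t < 0)) := by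
  rw [PySem.List.pyRange]
  rcases lt_trichotomy s 0 with h | h | h
  · have h1 : ¬ (0 < s) := by omega
    rw [if_neg hs, if_neg h1]
    by_cases ht : t < 0
    · rw [if_pos ht, List.length_map, List.length_range]
      have hdiv : 1 ≤ (0 - t + -s - 1) / (-s) := by
        rw [Int.le_ediv_iff_mul_le (by omega)]; omega
      constructor
      · intro _; exact Or.inr ⟨h, ht⟩
      · intro _; omega
    · rw [if_neg ht, List.length_map, List.length_range]
      constructor
      · intro hx; simp at hx
      · intro hx; omega
  · exact absurd h hs
  · rw [if_neg hs, if_pos h]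
    by_cases ht : (0:Int) < t
    · rw [if_pos ht, List.length_map, List.length_range]
      have hdiv : 1 ≤ (t - 0 + s - 1) / s := by
        rw [Int.le_ediv_iff_mul_le (by omega)]; omega
      constructor
      · intro _; exact Or.inl ⟨h, ht⟩
      · intro _; omega
    · rw [if_neg ht, List.length_map, List.length_range]
      constructor
      · intro hx; simp at hx
      · intro hx; omega

-- the whole grid A would enumerate without the cap
theorem outer_empty_xs (ws mw : Int) : ∀ (ys : List Int) (acc : List (Int × Int × Int × Int)),
    swOuterA ws mw [] ys acc = acc := by
  intro ys
  induction ys with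
  | nil => intro acc; simp [swOuterA]
  | cons y rest ih => intro acc; simp [swOuterA, swInnerA, ih]

-- ===== VERDICT (by name: the statements are the Claim_ definitions above) =====
theorem smart_sliding_windows_spec : Claim_unchanged_smart_sliding_windows := by
  unfold Claim_unchanged_smart_sliding_windows
  intro img_shape ws stride mw _ hpre hnd
  obtain ⟨hlen, hs⟩ := hpre
  simp only [smart_sliding_windows, smart_sliding_windows_alt]
  set h := PySem.List.pyGetD img_shape 0 0 with hh
  set w := PySem.List.pyGetD img_shape 1 0 with hw
  set s : Int := if max h w > 2000 then ws else stride with hsdef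
  set xs := PySem.List.pyRange 0 (w - ws + 1) s with hxs
  set ys := PySem.List.pyRange 0 (h - ws + 1) s with hys
  set nxN := xs.length with hnx
  set nyN := ys.length with hny
  -- B as a map over List.range
  have hB : (PySem.List.pyRange 0 (min ((nxN : Int) * (nyN : Int)) mw) 1).map (fun i =>
        (PySem.Int.mod i (nxN : Int) * s, PySem.Int.floordiv i (nxN : Int) * s,
         PySem.Int.mod i (nxN : Int) * s + ws, PySem.Int.floordiv i (nxN : Int) * s + ws)) =
      (List.range (min ((nxN : Int) * (nyN : Int)) mw).toNat).map (fun k =>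
        (((k % nxN : Nat) : Int) * s, ((k / nxN : Nat) : Int) * s,
         ((k % nxN : Nat) : Int) * s + ws, ((k / nxN : Nat) : Int) * s + ws)) := by
    rw [PySem.List.pyRange_one]
    rw [List.map_map]
    simp only [Int.sub_zero]
    refine List.map_congr_left (fun k _ => ?_)
    simp only [Function.comp_apply, zero_add]
    rw [PySem.Int.floordiv_natCast, PySem.Int.mod_natCast]
  by_cases hgrid : nxN = 0 ∨ nyN = 0
  -- empty grid: both produce []
  · have hprod : (nxN : Int) * (nyN : Int) = 0 := by
      rcases hgrid with h0 | h0 <;> simp [h0]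
    have hBnil : (PySem.List.pyRange 0 (min ((nxN : Int) * (nyN : Int)) mw) 1) = [] := by
      apply PySem.List.pyRange_one_eq_nil
      rw [hprod]
      exact min_le_left 0 mw
    have hAnil : swOuterA ws mw xs ys [] = [] := by
      rcases hgrid with h0 | h0
      · have : xs = [] := List.eq_nil_of_length_eq_zero h0
        rw [this, outer_empty_xs]
      · have : ys = [] := List.eq_nil_of_length_eq_zero h0
        rw [this]; simp [swOuterA]
    simp only [hAnil, hBnil, List.map_nil]
  -- nonempty grid: outside D_ forces 1 ≤ mw
  · push_neg at hgrid
    have hxpos : 0 < nxN := Nat.pos_of_ne_zero hgrid.1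
    have hypos : 0 < nyN := Nat.pos_of_ne_zero hgrid.2
    have hmw : 1 ≤ mw := by
      by_contra hmw
      apply hnd
      unfold D_smart_sliding_windows
      simp only [← hh, ← hw, ← hsdef]
      refine ⟨by omega, ?_⟩
      have h1 := (pyRange_zero_len_pos (w - ws + 1) s hs).mp (by rw [← hxs]; omega)
      have h2 := (pyRange_zero_len_pos (h - ws + 1) s hs).mp (by rw [← hys]; omega)
      rcases h1 with ⟨a1, b1⟩ | ⟨a1, b1⟩
      · rcases h2 with ⟨a2, b2⟩ | ⟨a2, b2⟩
        · exact Or.inl ⟨a1, b1, b2⟩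
        · omega
      · rcases h2 with ⟨a2, b2⟩ | ⟨a2, b2⟩
        · omega
        · exact Or.inr ⟨a1, b1, b2⟩
    rw [sw_outer_eq ws mw xs ys [] (by simp; omega), hB]
    set cntN := (min ((nxN : Int) * (nyN : Int)) mw).toNat with hcnt
    have hxs' : xs = (List.range nxN).map (fun (c : Nat) => (s * (c : Int))) := by
      rw [hnx, hxs]; exact pyRange_zero_eq _ _
    have hys' : ys = (List.range nyN).map (fun (r : Nat) => (s * (r : Int))) := by
      rw [hny, hys]; exact pyRange_zero_eq _ _
    have hmulc : nxN * nyN = nyN * nxN := Nat.mul_comm _ _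
    have hc : ((nxN * nyN : Nat) : Int) = (nxN : Int) * (nyN : Int) := by push_cast; ring
    have hprodA : ys.flatMap (fun y => xs.map (fun x => (x, y, x + ws, y + ws))) =
        (List.range nyN).flatMap (fun r => (List.range nxN).map (fun c =>
          (((c : Nat) : Int) * s, ((r : Nat) : Int) * s, ((c : Nat) : Int) * s + ws, ((r : Nat) : Int) * s + ws))) := by
      rw [hxs', hys', List.flatMap_map]
      refine flatMapCongrMem (fun r _ => ?_)
      simp only [List.map_map]
      refine List.map_congr_left (fun c _ => ?_)
      simp only [Function.comp_apply]
      rw [mul_comm s (c : Int), mul_comm s (r : Int)]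
    rw [hprodA]
    have hcnt_le : cntN ≤ nyN * nxN := by omega
    rw [grid_take (fun r c => (((c : Nat) : Int) * s, ((r : Nat) : Int) * s,
          ((c : Nat) : Int) * s + ws, ((r : Nat) : Int) * s + ws)) nyN nxN cntN hcnt_le]
    have hlenflat : ((List.range nyN).flatMap (fun r => (List.range nxN).map (fun c =>
          (((c : Nat) : Int) * s, ((r : Nat) : Int) * s, ((c : Nat) : Int) * s + ws, ((r : Nat) : Int) * s + ws)))).length
        = nyN * nxN := by
      simp [List.length_flatMap]
    simp only [List.nil_append, List.length_nil, Nat.cast_zero, Int.sub_zero]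
    rcases le_or_gt (mw.toNat) (nyN * nxN) with hle | hgt
    · have he : cntN = mw.toNat := by omega
      rw [he]
    · have he : cntN = nyN * nxN := by omega
      rw [he, List.take_of_length_le (by omega), List.take_of_length_le (by omega)]

theorem smart_sliding_windows_changed : Claim_changed_smart_sliding_windows := by
  unfold Claim_changed_smart_sliding_windows; decide

theorem smart_sliding_windows_tight : Claim_exact_smart_sliding_windows := by
  unfold Claim_exact_smart_sliding_windows
  intro img_shape ws stride mw _ hpre hd
  obtain ⟨hlen, hs⟩ := hpre
  unfold D_smart_sliding_windows at hd
  simp only at hd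
  obtain ⟨hmw, hsign⟩ := hd
  simp only [smart_sliding_windows, smart_sliding_windows_alt]
  set h := PySem.List.pyGetD img_shape 0 0
  set w := PySem.List.pyGetD img_shape 1 0
  set s : Int := if max h w > 2000 then ws else stride
  set xs := PySem.List.pyRange 0 (w - ws + 1) s with hxs
  set ys := PySem.List.pyRange 0 (h - ws + 1) s with hys
  have hxpos : 0 < xs.length := by
    rw [hxs, pyRange_zero_len_pos _ _ hs]; tauto
  have hypos : 0 < ys.length := by
    rw [hys, pyRange_zero_len_pos _ _ hs]; tauto
  -- B is empty
  have hBnil : (PySem.List.pyRange 0 (min ((xs.length : Int) * (ys.length : Int)) mw) 1) = [] := by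
    apply PySem.List.pyRange_one_eq_nil
    exact (min_le_right _ _).trans hmw
  rw [hBnil, List.map_nil]
  -- A is a nonempty list
  obtain ⟨x0, xs', hxcons⟩ := List.exists_cons_of_ne_nil (List.ne_nil_of_length_pos hxpos)
  obtain ⟨y0, ys', hycons⟩ := List.exists_cons_of_ne_nil (List.ne_nil_of_length_pos hypos)
  rw [hxcons, hycons]
  simp only [swOuterA, swInnerA, List.nil_append]
  have hcap : mw ≤ (([(x0, y0, x0 + ws, y0 + ws)] : List (Int × Int × Int × Int)).length : Int) := by
    simp only [List.length_cons, List.length_nil]; omega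
  rw [if_pos hcap]
  simp
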